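-- pv_equiv track=rewrite | github.com/OuniAchir/spam-classifier | Classifier_email.py | list_vocabulaire2
-- ===== SOURCE A (Python) =====
-- import collections
--
-- def list_vocabulaire2(X,k):
--   list=X.split()
--   vocabulaire=[]
--   v = collections.Counter(list)
--   keys = v.keys() # récupérer les clés de v
--   for key in keys:
--    if v[key]>k :
--     vocabulaire.append(key) #ajouter les mots qui se repetent plus q k fois dans la lste vocabulaire
--   return vocabulaire
-- ===== SOURCE B (Python) =====
-- def list_vocabulaire2(X, k):
--     # No frequency table and no per-word membership test: repeatedly take the
--     # first remaining word, strip ALL its occurrences from the list in one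
--     # filtering pass, and read its count off the length drop.
--     words = X.split()
--     vocabulaire = []
--     while words:
--         w = words[0]
--         rest = [x for x in words if x != w]
--         if len(words) - len(rest) > k:
--             vocabulaire.append(w)
--         words = rest
--     return vocabulaire
-- ===== Notes on version B (the rewrite author's own statement) =====
-- stated objective: alternative
-- what changed: Replaces the Counter frequency table and its key iteration by a list-shrinking loop: repeatedly take the first remaining word, filter out all of its occurrences, and use the length drop as its count; first-appearance order falls out of the shrinking order.
import Mathlib
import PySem

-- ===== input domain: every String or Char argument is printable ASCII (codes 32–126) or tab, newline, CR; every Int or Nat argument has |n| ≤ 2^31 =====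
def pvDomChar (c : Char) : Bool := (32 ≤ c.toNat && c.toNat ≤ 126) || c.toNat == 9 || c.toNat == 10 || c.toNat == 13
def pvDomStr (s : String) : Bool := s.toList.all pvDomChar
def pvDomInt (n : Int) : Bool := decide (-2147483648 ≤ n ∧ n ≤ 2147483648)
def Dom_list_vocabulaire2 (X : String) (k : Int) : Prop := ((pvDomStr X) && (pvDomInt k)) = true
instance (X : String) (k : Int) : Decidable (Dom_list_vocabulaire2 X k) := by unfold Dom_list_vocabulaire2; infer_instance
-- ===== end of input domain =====

-- B replaces A's Counter table + key iteration by a list-shrinking loop: repeatedly take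
-- the first remaining word, filter all its occurrences out, and use the length drop as its
-- count (alternative algorithm; return-value equivalence).


-- ===== PORT A =====
def list_vocabulaire2 (X : String) (k : Int) : List String :=
  let list := PySem.Str.split₀ X
  let v := PySem.Dict.counter list
  let keys := v.keys
  keys.foldl (fun vocabulaire key =>
    if v.getD key 0 > k then vocabulaire ++ [key] else vocabulaire) []

-- ===== PORT B =====
-- the while loop of Source B: shrink 'words' by filtering out all copies of its first word
def pvLoop (k : Int) (vocab : List String) : List String → List String
  | [] => vocab
  | w :: t =>
    let rest := (w :: t).filter (fun x => x ≠ w)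
    let vocab' := if (((w :: t).length : Int) - (rest.length : Int) > k)
                  then vocab ++ [w] else vocab
    pvLoop k vocab' rest
termination_by l => l.length
decreasing_by
  simp only [List.filter]
  simp
  exact List.length_filter_le _ _

def list_vocabulaire2_alt (X : String) (k : Int) : List String :=
  pvLoop k [] (PySem.Str.split₀ X)

-- ===== PRECONDITION & SPEC =====
def Spec_list_vocabulaire2 (X : String) (k : Int) (out : List String) : Prop := out = list_vocabulaire2_alt X k
instance (X : String) (k : Int) (out : List String) : Decidable (Spec_list_vocabulaire2 X k out) := by unfold Spec_list_vocabulaire2; infer_instance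

-- ===== CLAIM (what is proved, stated in full; the proofs are below) =====
def Claim_equal_list_vocabulaire2 : Prop := ∀ (X : String) (k : Int), Dom_list_vocabulaire2 X k → Spec_list_vocabulaire2 X k (list_vocabulaire2 X k)

-- ===== LEMMAS AND PROOFS =====

-- the words of l not in s, first occurrences only, in order
def pvNew (s : List String) : List String → List String
  | [] => []
  | x :: xs => if x ∈ s then pvNew s xs else x :: pvNew (s ++ [x]) xs

theorem pvNew_congr : ∀ (t s s' : List String), (∀ x, x ∈ s ↔ x ∈ s') →
    pvNew s t = pvNew s' t := by
  intro t
  induction t with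
  | nil => intro s s' _; rfl
  | cons x xs ih =>
    intro s s' h
    by_cases hx : x ∈ s
    · have hx' : x ∈ s' := (h x).1 hx
      simp [pvNew, hx, hx', ih s s' h]
    · have hx' : x ∉ s' := fun c => hx ((h x).2 c)
      have h' : ∀ y, y ∈ s ++ [x] ↔ y ∈ s' ++ [x] := by
        intro y; simp [h y]
      simp [pvNew, hx, hx', ih _ _ h']

theorem pvNew_subset {x : String} : ∀ (t s : List String), x ∈ pvNew s t → x ∈ t := by
  intro t
  induction t with
  | nil => intro s h; simp [pvNew] at h
  | cons y ys ih =>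
    intro s h
    by_cases hy : y ∈ s
    · simp [pvNew, hy] at h
      exact List.mem_cons_of_mem _ (ih _ h)
    · simp [pvNew, hy] at h
      rcases h with h | h
      · simp [h]
      · exact List.mem_cons_of_mem _ (ih _ h)

theorem pvNew_filter (w : String) : ∀ (t s : List String),
    pvNew (s ++ [w]) t = pvNew s (t.filter (fun x => x ≠ w)) := by
  intro t
  induction t with
  | nil => intro s; rfl
  | cons x xs ih =>
    intro s
    by_cases hw : x = w
    · subst hw
      simp [pvNew, List.filter_cons, ih s]
    · by_cases hs : x ∈ s
      · simp [pvNew, List.filter_cons, hw, hs, ih s]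
      · have hmem : x ∉ s ++ [w] := by simp [hs, hw]
        have hcongr : pvNew (s ++ [w] ++ [x]) xs = pvNew (s ++ [x] ++ [w]) xs := by
          apply pvNew_congr
          intro y; simp; tauto
        simp only [List.filter_cons]
        simp [pvNew, hw, hs, hmem]
        rw [show s ++ [w, x] = s ++ [w] ++ [x] from by simp, hcongr]
        simpa using ih (s ++ [x])

theorem pvSet_add_of_mem {s : List String} {x : String} (h : x ∈ s) :
    PySem.Set.add s x = s := by
  simp [PySem.Set.add, PySem.Set.contains, h]

theorem pvSet_add_of_not_mem {s : List String} {x : String} (h : x ∉ s) :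
    PySem.Set.add s x = s ++ [x] := by
  simp [PySem.Set.add, PySem.Set.contains, h]

theorem pvUpdate_eq (l : List String) : ∀ s : List String,
    PySem.Set.update s l = s ++ pvNew s l := by
  induction l with
  | nil => intro s; simp [PySem.Set.update, pvNew]
  | cons x xs ih =>
    intro s
    by_cases hx : x ∈ s
    · have : PySem.Set.update s (x :: xs) = PySem.Set.update (PySem.Set.add s x) xs := rfl
      rw [this, pvSet_add_of_mem hx, ih s]
      simp [pvNew, hx]
    · have : PySem.Set.update s (x :: xs) = PySem.Set.update (PySem.Set.add s x) xs := rfl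
      rw [this, pvSet_add_of_not_mem hx, ih (s ++ [x])]
      simp [pvNew, hx]

theorem pvOfList_eq_pvNew (l : List String) : PySem.Set.ofList l = pvNew [] l := by
  have := pvUpdate_eq l []
  simpa [PySem.Set.update, PySem.Set.ofList, PySem.Set.empty] using this

theorem pvCount_filter_ne {x w : String} (h : x ≠ w) (t : List String) :
    (t.filter (fun y => y ≠ w)).count x = t.count x := by
  induction t with
  | nil => rfl
  | cons y ys ih =>
    by_cases hy : y = w
    · subst hy
      simp [List.filter_cons, List.count_cons, Ne.symm h]
      simpa using ih
    · simp only [List.filter_cons, ne_eq, hy, decide_not, decide_false, Bool.not_false, if_true]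
      simp [List.count_cons, hy]
      simpa using ih

theorem pvCount_as_length (w : String) (l : List String) :
    ((l.count w : Int)) = (l.length : Int) - ((l.filter (fun x => x ≠ w)).length : Int) := by
  induction l with
  | nil => rfl
  | cons x t ih =>
    by_cases hx : x = w
    · subst hx
      simp only [List.count_cons, List.filter_cons, ne_eq, decide_not] at ih ⊢
      simp at ih ⊢
      push_cast at ih ⊢
      omega
    · simp only [List.count_cons, List.filter_cons, ne_eq, decide_not] at ih ⊢
      simp [hx, Ne.symm hx] at ih ⊢
      push_cast at ih ⊢
      omega

theorem pvLoop_eq (k : Int) : ∀ (l vocab : List String),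
    pvLoop k vocab l = vocab ++ (pvNew [] l).filter (fun x => ((l.count x : Int)) > k) := by
  have H : ∀ (n : ℕ) (l : List String), l.length = n → ∀ vocab,
      pvLoop k vocab l = vocab ++ (pvNew [] l).filter (fun x => ((l.count x : Int)) > k) := by
    intro n
    induction n using Nat.strong_induction_on with
    | _ n ih =>
      intro l hl vocab
      match l with
      | [] => simp [pvLoop, pvNew]
      | w :: t =>
        have hfl : (w :: t).filter (fun x => x ≠ w) = t.filter (fun x => x ≠ w) := by
          simp [List.filter_cons]
        have hlen : (t.filter (fun x => x ≠ w)).length < n := by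
          have := List.length_filter_le (fun x => decide (x ≠ w)) t
          simp at hl
          omega
        have hcnt := pvCount_as_length w (w :: t)
        rw [hfl] at hcnt
        have hrec := ih _ hlen (t.filter (fun x => x ≠ w)) rfl
        have hnew : pvNew [] (w :: t) = w :: pvNew [] (t.filter (fun x => x ≠ w)) := by
          have h1 : pvNew [] (w :: t) = w :: pvNew ([] ++ [w]) t := by
            simp [pvNew]
          rw [h1, pvNew_filter]
        have hfc : (pvNew [] (t.filter (fun x => x ≠ w))).filter
              (fun x => (((w :: t).count x : Int)) > k)
            = (pvNew [] (t.filter (fun x => x ≠ w))).filter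
              (fun x => (((t.filter (fun y => y ≠ w)).count x : Int)) > k) := by
          apply List.filter_congr
          intro x hx
          have hxr : x ∈ t.filter (fun y => y ≠ w) := pvNew_subset _ _ hx
          have hxw : x ≠ w := by
            have := List.of_mem_filter hxr
            simpa using this
          rw [List.count_cons]
          simp [hxw, Ne.symm hxw, pvCount_filter_ne hxw]
        show pvLoop k vocab (w :: t) = _
        rw [pvLoop]
        simp only [hfl]
        rw [hrec]
        rw [hnew]
        rw [List.filter_cons]
        by_cases hc : (((w :: t).count w : Int)) > k
        · have hc' : ((w :: t).length : Int) - ((t.filter (fun x => x ≠ w)).length : Int) > k := by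
            omega
          simp only [hc', if_pos, hc, decide_true, hfc]
          simp
        · have hc' : ¬ (((w :: t).length : Int) - ((t.filter (fun x => x ≠ w)).length : Int) > k) := by
            omega
          simp only [hc', if_neg, hc, decide_false, hfc]
          simp
  intro l vocab
  exact H l.length l rfl vocab

theorem list_vocabulaire2_eq (X : String) (k : Int) :
    list_vocabulaire2 X k = list_vocabulaire2_alt X k := by
  unfold list_vocabulaire2 list_vocabulaire2_alt
  rw [pvLoop_eq]
  simp only [PySem.Dict.keys_counter, PySem.Dict.getD_counter, pvOfList_eq_pvNew,
    List.nil_append]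
  exact PySem.List.foldl_append_ite_eq_filter _ _ _

-- ===== VERDICT (by name: the statement is the Claim_ definition above) =====
theorem list_vocabulaire2_spec : Claim_equal_list_vocabulaire2 := by
  intro X k _
  unfold Spec_list_vocabulaire2
  exact list_vocabulaire2_eq X k
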